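-- pv_equiv track=rewrite | github.com/ketankr9/leetcode-solutions | 535.encode-and-decode-tinyurl.py | calc
-- ===== SOURCE A (Python) =====
-- def calc(s):
--     e = 3
--     val = 0
--     for i,c in enumerate(s):
--         val += e**i*ord(c)
--     val = val%62
--     if val>52:
--         return chr(ord('0')+val-52)
--     elif val >= 26:
--         return chr(ord('A') + (val-26))
--     else:
--         return chr(ord('a') + val)
-- ===== SOURCE B (Python) =====
-- _TABLE = "abcdefghijklmnopqrstuvwxyzABCDEFGHIJKLMNOPQRSTUVWXYZ[123456789"
--
-- def calc(s):
--     # Horner evaluation back-to-front, reducing mod 62 at every step; the final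
--     # branch chain is replaced by one lookup in _TABLE, which tabulates the
--     # val -> character mapping (index 52 is '[' and '0' never occurs, exactly
--     # the mapping A's comparison chain implements).
--     v = 0
--     for c in reversed(s):
--         v = (v * 3 + ord(c)) % 62
--     return _TABLE[v]
-- ===== Notes on version B (the rewrite author's own statement) =====
-- stated objective: faster
-- what changed: B replaces A's per-character recomputation of the unbounded power 3**i plus a final comparison chain by a back-to-front Horner pass that reduces mod 62 at every step and a single 62-entry table lookup, so all arithmetic stays on numbers below 62.
import Mathlib
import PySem

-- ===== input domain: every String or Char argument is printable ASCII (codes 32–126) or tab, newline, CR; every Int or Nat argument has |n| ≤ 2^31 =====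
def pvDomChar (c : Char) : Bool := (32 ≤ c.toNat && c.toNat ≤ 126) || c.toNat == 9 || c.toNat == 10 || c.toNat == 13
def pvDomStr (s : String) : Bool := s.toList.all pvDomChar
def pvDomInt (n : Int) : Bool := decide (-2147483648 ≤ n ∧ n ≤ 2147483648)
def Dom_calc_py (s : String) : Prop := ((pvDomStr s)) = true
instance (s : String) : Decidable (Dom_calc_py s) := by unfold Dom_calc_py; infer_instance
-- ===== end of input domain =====

-- B evaluates the weighted sum by a back-to-front Horner pass reduced mod 62 each step and
-- maps the result through a 62-entry table (the tabulation of A's comparison chain): faster,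
-- since A's 3**i grows without bound while B's numbers stay below 62.

-- ===== PORT A =====
-- enumerate index is ≥ 0, so 3**i is ported as 3 ^ i.toNat (exact on all indices enumerate produces)
def calc_py (s : String) : String :=
  let val : Int :=
    (PySem.List.enumerate s.toList).foldl (fun val ic => val + 3 ^ ic.1.toNat * (ic.2.toNat : Int)) 0
  let val := PySem.Int.mod val 62
  -- chr(k) for 0 ≤ k < 128: Char.ofNat k.toNat is exact
  if val > 52 then String.ofList [Char.ofNat (('0'.toNat : Int) + val - 52).toNat]
  else if val ≥ 26 then String.ofList [Char.ofNat (('A'.toNat : Int) + (val - 26)).toNat]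
  else String.ofList [Char.ofNat (('a'.toNat : Int) + val).toNat]

-- ===== PORT B =====
def pvTable : List Char :=
  "abcdefghijklmnopqrstuvwxyzABCDEFGHIJKLMNOPQRSTUVWXYZ[123456789".toList

-- _TABLE[v]: v is always in range (0 ≤ v < 62 is proved below), so pyGetD is exact here
def calc_py_alt (s : String) : String :=
  let v : Int :=
    s.toList.reverse.foldl (fun v c => PySem.Int.mod (v * 3 + (c.toNat : Int)) 62) 0
  String.ofList [PySem.List.pyGetD pvTable v ' ']

-- ===== PRECONDITION & SPEC =====
def Spec_calc_py (s : String) (out : String) : Prop := out = calc_py_alt s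
instance (s : String) (out : String) : Decidable (Spec_calc_py s out) := by unfold Spec_calc_py; infer_instance

-- ===== CLAIM (what is proved, stated in full; the proofs are below) =====
def Claim_equal_calc_py : Prop := ∀ (s : String), Dom_calc_py s → Spec_calc_py s (calc_py s)

-- ===== LEMMAS AND PROOFS =====

-- the weighted sum sum_i 3^i * ord(c_i), written as a right fold (Horner, unreduced)
def pvH (cs : List Char) : Int := cs.foldr (fun c v => v * 3 + (c.toNat : Int)) 0

-- A's enumerate-fold from index i with accumulator v is v + 3^i * pvH
theorem pvA_eq_H (cs : List Char) (i : Nat) (v : Int) :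
    (PySem.List.enumerate cs (i : Int)).foldl
        (fun val ic => val + 3 ^ ic.1.toNat * (ic.2.toNat : Int)) v
      = v + 3 ^ i * pvH cs := by
  induction cs generalizing i v with
  | nil => simp [pvH, PySem.List.enumerate]
  | cons c cs ih =>
      rw [PySem.List.enumerate_cons, List.foldl_cons]
      have h : ((i : Int) + 1) = ((i + 1 : Nat) : Int) := by push_cast; ring
      rw [h, ih]
      simp only [pvH, List.foldr_cons, Int.toNat_natCast, pow_succ]
      ring

-- B's reduced left fold tracks the unreduced left fold mod 62
theorem pvB_mod (cs : List Char) (v : Int) :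
    cs.foldl (fun v c => PySem.Int.mod (v * 3 + (c.toNat : Int)) 62) (PySem.Int.mod v 62)
      = PySem.Int.mod (cs.foldl (fun v c => v * 3 + (c.toNat : Int)) v) 62 := by
  induction cs generalizing v with
  | nil => rfl
  | cons c cs ih =>
      rw [List.foldl_cons, List.foldl_cons]
      have h62 : (0:Int) < 62 := by norm_num
      have e : PySem.Int.mod (PySem.Int.mod v 62 * 3 + (c.toNat : Int)) 62
          = PySem.Int.mod (v * 3 + (c.toNat : Int)) 62 := by
        simp only [PySem.Int.mod_eq_emod_of_pos h62]
        conv_lhs => rw [Int.add_emod, Int.mul_emod, Int.emod_emod_of_dvd _ (dvd_refl 62),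
          ← Int.mul_emod, ← Int.add_emod]
      rw [e, ih]

-- A's comparison chain agrees with the table lookup on every residue 0 ≤ val < 62
set_option maxHeartbeats 2000000 in
theorem pvChain_eq_table (val : Int) (h0 : 0 ≤ val) (h1 : val < 62) :
    (if val > 52 then String.ofList [Char.ofNat (('0'.toNat : Int) + val - 52).toNat]
     else if val ≥ 26 then String.ofList [Char.ofNat (('A'.toNat : Int) + (val - 26)).toNat]
     else String.ofList [Char.ofNat (('a'.toNat : Int) + val).toNat])
      = String.ofList [PySem.List.pyGetD pvTable val ' '] := by
  interval_cases val <;> decide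

-- ===== VERDICT (by name: the statement is the Claim_ definition above) =====
theorem calc_py_spec : Claim_equal_calc_py := by
  intro s _
  unfold Spec_calc_py calc_py calc_py_alt
  have h62 : (0:Int) < 62 := by norm_num
  have hA := pvA_eq_H s.toList 0 0
  norm_num at hA
  have hB := pvB_mod s.toList.reverse 0
  rw [show PySem.Int.mod (0:Int) 62 = 0 from rfl] at hB
  have hrev : s.toList.reverse.foldl (fun v c => v * 3 + (c.toNat : Int)) 0 = pvH s.toList := by
    rw [List.foldl_reverse]; rfl
  rw [hA, hB, hrev]
  exact pvChain_eq_table _ (PySem.Int.mod_nonneg _ h62) (PySem.Int.mod_lt _ h62)
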